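-- pv_equiv track=rewrite | github.com/danshiovitz/adventofcode | 2017/src/solve.py | run_day03
-- ===== SOURCE A (Python) =====
-- from itertools import combinations, count, groupby, permutations
--
-- def run_day03(input):
--     def x_y(loc):
--         radius = next(r for r in count() if loc <= (r*2+1)**2)
--         # now say we have a square like
--         #     5 4 3
--         #     6 . 2
--         #     7 8 9
--         # we want to map loc to an offset around the square, starting in the lower right
--         cur_area = (radius*2+1)**2
--         prev_area = (radius*2-1)**2 if radius > 0 else 0
--         edge_size = cur_area - prev_area
--         offset = (loc - prev_area) % edge_size
--         # then given the offset and the edge_size we can figure out the x,y: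
--         if offset < edge_size // 4:
--             x = radius
--             mid = radius
--             y = offset - mid
--         elif offset < edge_size // 2:
--             mid = radius * 3
--             x = mid - offset
--             y = radius
--         elif offset < edge_size * 3 // 4:
--             x = -radius
--             mid = radius * 5
--             y = mid - offset
--         else:
--             mid = radius * 7
--             x = offset - mid
--             y = -radius
--         return (x, y)
--
--     def neighbors(c):
--         x, y = c
--         return [
--             (x+1, y-1), (x+1, y), (x+1, y+1),
--             (x, y-1), (x, y+1),
--             (x-1, y-1), (x-1, y), (x-1, y+1),
--         ]
--
--     cache = {(0, 0): 1}
--     def calc_val(c):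
--         if c not in cache:
--             cache[c] = sum(cache.get(n, 0) for n in neighbors(c))
--         return cache[c]
--
--     val = int(input[0])
--     return [
--         sum(abs(c) for c in x_y(val)),
--         next(calc_val(x_y(idx)) for idx in count(1) if calc_val(x_y(idx)) > val),
--     ]
-- ===== SOURCE B (Python) =====
-- def run_day03(input):
--     val = int(input[0])
--
--     def part1(v):
--         # distance of cell v: binary-search the ring, then distance to the edge midpoint
--         if v <= 1:
--             return 0
--         lo, hi = 0, v  # least r with v <= (2r+1)**2
--         while lo < hi:
--             mid = (lo + hi) // 2
--             if v <= (2 * mid + 1) ** 2: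
--                 hi = mid
--             else:
--                 lo = mid + 1
--         r = lo
--         return r + abs((v - (2 * r - 1) ** 2 - 1) % (2 * r) - (r - 1))
--
--     def part2(v):
--         # walk the spiral, storing each cell's neighbor sum, until one exceeds v
--         grid = {(0, 0): 1}
--         if 1 > v:
--             return 1
--         x = y = 0
--         dx, dy = 1, 0
--         run, left, legs = 1, 1, 2
--         while True:
--             x, y = x + dx, y + dy
--             s = sum(grid.get((x + ex, y + ey), 0)
--                     for ex in (-1, 0, 1) for ey in (-1, 0, 1) if (ex, ey) != (0, 0))
--             grid[(x, y)] = s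
--             if s > v:
--                 return s
--             left -= 1
--             if left == 0:
--                 dx, dy = -dy, dx
--                 legs -= 1
--                 if legs == 0:
--                     run += 1
--                     legs = 2
--                 left = run
--     return [part1(val), part2(val)]
-- ===== Notes on version B (the rewrite author's own statement) =====
-- stated objective: alternative
-- what changed: Part 1 replaces the linear ring scan plus coordinate branches by a binary search for the ring and a direct distance formula (no coordinates); part 2 replaces the closed-form cell-index-to-coordinate mapping recomputed per index by an incremental spiral walk that steps with run-lengths 1,1,2,2,3,3,... and sums the 8 stored neighbours of each new cell.
import Mathlib
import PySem

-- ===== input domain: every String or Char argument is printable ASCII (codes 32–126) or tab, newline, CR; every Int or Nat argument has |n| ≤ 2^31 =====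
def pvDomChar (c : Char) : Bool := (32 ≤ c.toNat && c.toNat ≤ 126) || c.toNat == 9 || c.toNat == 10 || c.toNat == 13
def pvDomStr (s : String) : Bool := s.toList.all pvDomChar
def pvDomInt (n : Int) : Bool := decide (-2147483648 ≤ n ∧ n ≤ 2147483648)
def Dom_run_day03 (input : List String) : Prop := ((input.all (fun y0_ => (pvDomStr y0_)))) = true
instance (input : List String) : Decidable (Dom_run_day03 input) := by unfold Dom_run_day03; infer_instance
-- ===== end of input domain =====

-- B replaces A's linear ring scan + coordinate branches (part 1) by a binary search and a direct
-- distance formula, and A's per-index closed-form coordinate mapping (part 2) by an incremental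
-- spiral walk summing the 8 stored neighbours of each new cell; objective: alternative algorithm.
-- Both loops of part 2 are ported with a fuel bound val.toNat + O(1) (the searched stress value
-- exceeds val within that many cells); the fuel is a totality guard, not an algorithm switch.

-- ===== PORT A =====
-- next(r for r in count() if loc <= (r*2+1)**2); the search succeeds within loc.toNat + 1 steps
def radiusAux (loc : Int) : Nat → Nat → Nat
  | 0, r => r
  | fuel + 1, r => if loc ≤ ((r : Int) * 2 + 1) ^ 2 then r else radiusAux loc fuel (r + 1)

def radiusA (loc : Int) : Nat := radiusAux loc (loc.toNat + 1) 0

def x_y (loc : Int) : Int × Int :=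
  let radius : Int := (radiusA loc : Int)
  let cur_area := (radius * 2 + 1) ^ 2
  let prev_area := if radius > 0 then (radius * 2 - 1) ^ 2 else 0
  let edge_size := cur_area - prev_area
  let offset := PySem.Int.mod (loc - prev_area) edge_size
  if offset < PySem.Int.floordiv edge_size 4 then (radius, offset - radius)
  else if offset < PySem.Int.floordiv edge_size 2 then (radius * 3 - offset, radius)
  else if offset < PySem.Int.floordiv (edge_size * 3) 4 then (-radius, radius * 5 - offset)
  else (offset - radius * 7, -radius)

def neighborsA (c : Int × Int) : List (Int × Int) :=
  [(c.1 + 1, c.2 - 1), (c.1 + 1, c.2), (c.1 + 1, c.2 + 1),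
   (c.1, c.2 - 1), (c.1, c.2 + 1),
   (c.1 - 1, c.2 - 1), (c.1 - 1, c.2), (c.1 - 1, c.2 + 1)]

def calcValA (cache : PySem.Dict (Int × Int) Int) (c : Int × Int) :
    PySem.Dict (Int × Int) Int × Int :=
  let cache' := if cache.contains c then cache
    else cache.insert c ((neighborsA c).foldl (fun a nb => a + cache.getD nb 0) 0)
  (cache', cache'.getD c 0)

-- next(calc_val(x_y(idx)) for idx in count(1) if calc_val(x_y(idx)) > val)
-- (fuel-bounded search; the value exceeds val within val.toNat + 9 indices)
def loopA (val : Int) (cache : PySem.Dict (Int × Int) Int) (idx : Int) : Nat → Int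
  | 0 => 0
  | fuel + 1 =>
    let c := x_y idx
    let p := calcValA cache c
    if p.2 > val then (calcValA p.1 c).2
    else loopA val p.1 (idx + 1) fuel

def part1A (val : Int) : Int :=
  let c := x_y val
  ((c.1.natAbs : Int) + (c.2.natAbs : Int))

def run_day03 (input : List String) : List Int :=
  match PySem.List.pyGet? input 0 with
  | none => []          -- IndexError, excluded by Pre_
  | some s =>
    match PySem.Int.ofStr? s with
    | none => []        -- ValueError, excluded by Pre_
    | some val =>
      [part1A val, loopA val (PySem.Dict.empty.insert (0, 0) 1) 1 (val.toNat + 9)]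

-- ===== PORT B =====
-- while lo < hi: … (fuel-bounded; the interval halves, so v.toNat + 1 iterations suffice)
def bsearchB (v : Int) : Int → Int → Nat → Int
  | lo, _, 0 => lo
  | lo, hi, fuel + 1 =>
    if lo < hi then
      let mid := PySem.Int.floordiv (lo + hi) 2
      if v ≤ (2 * mid + 1) ^ 2 then bsearchB v lo mid fuel else bsearchB v (mid + 1) hi fuel
    else lo

def part1B (v : Int) : Int :=
  if v ≤ 1 then 0
  else
    let r := bsearchB v 0 v (v.toNat + 1)
    r + ((PySem.Int.mod (v - (2 * r - 1) ^ 2 - 1) (2 * r) - (r - 1)).natAbs : Int)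

def offsB : List (Int × Int) :=
  (([-1, 0, 1] : List Int).flatMap (fun ex => ([-1, 0, 1] : List Int).map (fun ey => (ex, ey)))).filter
    (fun p => p ≠ ((0 : Int), (0 : Int)))

def loopB (val : Int) (grid : PySem.Dict (Int × Int) Int)
    (x y dx dy run left legs : Int) : Nat → Int
  | 0 => 0
  | fuel + 1 =>
    let nx := x + dx
    let ny := y + dy
    let s := (offsB.map (fun p => grid.getD (nx + p.1, ny + p.2) 0)).sum
    let grid' := grid.insert (nx, ny) s
    if s > val then s
    else
      let left1 := left - 1
      if left1 = 0 then
        let legs1 := legs - 1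
        if legs1 = 0 then loopB val grid' nx ny (-dy) dx (run + 1) (run + 1) 2 fuel
        else loopB val grid' nx ny (-dy) dx run run legs1 fuel
      else loopB val grid' nx ny dx dy run left1 legs fuel

def part2B (v : Int) : Int :=
  if 1 > v then 1
  else loopB v (PySem.Dict.empty.insert (0, 0) 1) 0 0 1 0 1 1 2 (v.toNat + 8)

def run_day03_alt (input : List String) : List Int :=
  match PySem.List.pyGet? input 0 with
  | none => []
  | some s =>
    match PySem.Int.ofStr? s with
    | none => []
    | some val => [part1B val, part2B val]

-- ===== PRECONDITION & SPEC =====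
-- Pre_ excludes exactly the inputs where A raises: an empty list (IndexError) and a first
-- element that int() rejects (ValueError).
def Pre_run_day03 (input : List String) : Prop :=
  input ≠ [] ∧ (PySem.Int.ofStr? (input.headD "")).isSome = true
instance (input : List String) : Decidable (Pre_run_day03 input) := by
  unfold Pre_run_day03; infer_instance

def pvWitness_run_day03 : List String := ["10"]

def Spec_run_day03 (input : List String) (out : List Int) : Prop := out = run_day03_alt input
instance (input : List String) (out : List Int) : Decidable (Spec_run_day03 input out) := by
  unfold Spec_run_day03; infer_instance

-- ===== CLAIM =====
def Claim_equal_run_day03 : Prop :=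
  ∀ (input : List String), Dom_run_day03 input → Pre_run_day03 input →
    Spec_run_day03 input (run_day03 input)

-- ===== LEMMAS AND PROOFS =====

lemma sqmono (a b : Int) (ha : 0 ≤ a) (hab : a ≤ b) : (a * 2 + 1) ^ 2 ≤ (b * 2 + 1) ^ 2 := by
  nlinarith

lemma radiusAux_eq (loc : Int) (r : Nat)
    (hP : loc ≤ ((r : Int) * 2 + 1) ^ 2)
    (hmin : ∀ r' : Nat, r' < r → ¬ loc ≤ ((r' : Int) * 2 + 1) ^ 2) :
    ∀ (fuel r0 : Nat), r0 ≤ r → r < r0 + fuel → radiusAux loc fuel r0 = r := by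
  intro fuel
  induction fuel with
  | zero => intro r0 h1 h2; omega
  | succ fuel ih =>
    intro r0 h1 h2
    by_cases hp : loc ≤ ((r0 : Int) * 2 + 1) ^ 2
    · have hr0 : r0 = r := by
        by_contra hne
        exact hmin r0 (by omega) hp
      simp only [radiusAux, if_pos hp]
      exact hr0
    · simp only [radiusAux, if_neg hp]
      have hne : r0 ≠ r := fun h => hp (h ▸ hP)
      exact ih (r0 + 1) (by omega) (by omega)

lemma radiusA_eq (loc : Int) (r : Nat)
    (hP : loc ≤ ((r : Int) * 2 + 1) ^ 2)
    (hmin : ∀ r' : Nat, r' < r → ¬ loc ≤ ((r' : Int) * 2 + 1) ^ 2) :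
    radiusA loc = r := by
  have hle : r ≤ loc.toNat := by
    by_contra h
    rw [not_le] at h
    refine hmin loc.toNat h ?_
    have h1 := Int.self_le_toNat loc
    nlinarith [Int.natCast_nonneg loc.toNat]
  exact radiusAux_eq loc r hP hmin (loc.toNat + 1) 0 (by omega) (by omega)

-- coordinates of the cell with ring r ≥ 1 and edge offset o ∈ [1, 8r]
def posForX (r o : Int) : Int :=
  if o ≤ 2 * r then r else if o ≤ 4 * r then 3 * r - o else if o ≤ 6 * r then -r else o - 7 * r
def posForY (r o : Int) : Int :=
  if o ≤ 2 * r then o - r else if o ≤ 4 * r then r else if o ≤ 6 * r then 5 * r - o else -r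
def posFor (r o : Int) : Int × Int := (posForX r o, posForY r o)

lemma radiusA_rep (r o : Int) (hr : 1 ≤ r) (ho1 : 1 ≤ o) (ho2 : o ≤ 8 * r) :
    radiusA ((2 * r - 1) ^ 2 + o) = r.toNat := by
  have hcast : ((r.toNat : Nat) : Int) = r := Int.toNat_of_nonneg (by omega)
  apply radiusA_eq
  · rw [hcast]; nlinarith
  · intro r' hlt
    rw [not_le]
    have h1 : ((r' : Nat) : Int) ≤ r - 1 := by
      have : ((r' : Nat) : Int) < ((r.toNat : Nat) : Int) := by exact_mod_cast hlt
      omega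
    have h2 := sqmono (r' : Int) (r - 1) (by positivity) h1
    nlinarith

lemma x_y_rep (r o : Int) (hr : 1 ≤ r) (ho1 : 1 ≤ o) (ho2 : o ≤ 8 * r) :
    x_y ((2 * r - 1) ^ 2 + o) = posFor r o := by
  have hcast : ((r.toNat : Nat) : Int) = r := Int.toNat_of_nonneg (by omega)
  have hrad : ((radiusA ((2 * r - 1) ^ 2 + o) : Nat) : Int) = r := by
    rw [radiusA_rep r o hr ho1 ho2]; exact hcast
  simp only [x_y, hrad]
  rw [if_pos (by omega : r > 0)]
  have hedge : (r * 2 + 1) ^ 2 - (r * 2 - 1) ^ 2 = 8 * r := by ring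
  have harg : (2 * r - 1) ^ 2 + o - (r * 2 - 1) ^ 2 = o := by ring
  rw [hedge, harg, PySem.Int.mod_eq_emod_of_pos (by omega),
    PySem.Int.floordiv_eq_ediv_of_pos (by omega : (0:Int) < 4),
    PySem.Int.floordiv_eq_ediv_of_pos (by omega : (0:Int) < 2),
    PySem.Int.floordiv_eq_ediv_of_pos (by omega : (0:Int) < 4)]
  have hd1 : (8 * r) / 4 = 2 * r := by omega
  have hd2 : (8 * r) / 2 = 4 * r := by omega
  have hd3 : (8 * r * 3) / 4 = 6 * r := by omega
  rw [hd1, hd2, hd3]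
  by_cases h8 : o = 8 * r
  · have hom : o % (8 * r) = 0 := by rw [h8]; exact Int.emod_self
    rw [hom]
    unfold posFor posForX posForY
    split_ifs <;> simp only [Prod.mk.injEq, and_true, true_and] <;> omega
  · have hom : o % (8 * r) = o := Int.emod_eq_of_lt (by omega) (by omega)
    rw [hom]
    unfold posFor posForX posForY
    split_ifs <;> simp only [Prod.mk.injEq, and_true, true_and] <;> omega

lemma posFor_ne_origin (r o : Int) (hr : 1 ≤ r) (ho1 : 1 ≤ o) (ho2 : o ≤ 8 * r) :
    posFor r o ≠ (0, 0) := by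
  unfold posFor posForX posForY
  intro h
  rw [Prod.mk.injEq] at h
  rcases h with ⟨h1, h2⟩
  split_ifs at h1 h2 <;> omega

lemma posFor_inj (r o r' o' : Int) (hr : 1 ≤ r) (ho1 : 1 ≤ o) (ho2 : o ≤ 8 * r)
    (hr' : 1 ≤ r') (ho1' : 1 ≤ o') (ho2' : o' ≤ 8 * r')
    (h : posFor r o = posFor r' o') : r = r' ∧ o = o' := by
  unfold posFor posForX posForY at h
  rw [Prod.mk.injEq] at h
  rcases h with ⟨h1, h2⟩
  split_ifs at h1 h2 <;> omega

-- the two neighbour enumerations sum to the same value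
lemma sums_eq (g : PySem.Dict (Int × Int) Int) (x y : Int) :
    (neighborsA (x, y)).foldl (fun a nb => a + g.getD nb 0) 0 =
      (offsB.map (fun p => g.getD (x + p.1, y + p.2) 0)).sum := by
  have hoffs : offsB = [(-1, -1), (-1, 0), (-1, 1), (0, -1), (0, 1), (1, -1), (1, 0), (1, 1)] := by
    decide
  simp only [hoffs, neighborsA, List.foldl, List.map, List.sum_cons, List.sum_nil]
  have e1 : x + (-1 : Int) = x - 1 := by ring
  have e2 : y + (-1 : Int) = y - 1 := by ring
  have e3 : x + (0 : Int) = x := by ring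
  have e4 : y + (0 : Int) = y := by ring
  rw [e1, e2, e3, e4]
  ring

-- B's walk state entering the iteration that produces the cell at ring r, offset o
def preX (r o : Int) : Int :=
  if o = 1 then r - 1 else if o ≤ 2 * r then r else if o ≤ 4 * r then 3 * r - o + 1
  else if o ≤ 6 * r then -r else o - 1 - 7 * r
def preY (r o : Int) : Int :=
  if o = 1 then 1 - r else if o ≤ 2 * r then o - 1 - r else if o ≤ 4 * r then r
  else if o ≤ 6 * r then 5 * r - o + 1 else -r
def preDX (r o : Int) : Int :=
  if o = 1 then 1 else if o ≤ 2 * r then 0 else if o ≤ 4 * r then -1 else if o ≤ 6 * r then 0 else 1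
def preDY (r o : Int) : Int :=
  if o = 1 then 0 else if o ≤ 2 * r then 1 else if o ≤ 4 * r then 0 else if o ≤ 6 * r then -1 else 0
def preRun (r o : Int) : Int :=
  if o ≤ 2 * r then 2 * r - 1 else if o ≤ 6 * r then 2 * r else 2 * r + 1
def preLeft (r o : Int) : Int :=
  if o = 1 then 1 else if o ≤ 2 * r then 2 * r - o + 1 else if o ≤ 4 * r then 4 * r - o + 1
  else if o ≤ 6 * r then 6 * r - o + 1 else 8 * r + 2 - o
def preLegs (r o : Int) : Int :=
  if o = 1 then 2 else if o ≤ 2 * r then 1 else if o ≤ 4 * r then 2 else if o ≤ 6 * r then 1 else 2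

-- the successor (r', o') of (r, o) along the spiral
def SuccRep (r o r' o' : Int) : Prop :=
  (o < 8 * r ∧ r' = r ∧ o' = o + 1) ∨ (o = 8 * r ∧ r' = r + 1 ∧ o' = 1)

lemma moveX (r o : Int) (hr : 1 ≤ r) (ho1 : 1 ≤ o) (ho2 : o ≤ 8 * r) :
    preX r o + preDX r o = posForX r o := by
  unfold preX preDX posForX; split_ifs <;> omega

lemma moveY (r o : Int) (hr : 1 ≤ r) (ho1 : 1 ≤ o) (ho2 : o ≤ 8 * r) :
    preY r o + preDY r o = posForY r o := by
  unfold preY preDY posForY; split_ifs <;> omega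

lemma nextX (r o r' o' : Int) (hr : 1 ≤ r) (ho1 : 1 ≤ o) (hs : SuccRep r o r' o') :
    posForX r o = preX r' o' := by
  unfold SuccRep at hs; unfold posForX preX; split_ifs <;> omega

lemma nextY (r o r' o' : Int) (hr : 1 ≤ r) (ho1 : 1 ≤ o) (hs : SuccRep r o r' o') :
    posForY r o = preY r' o' := by
  unfold SuccRep at hs; unfold posForY preY; split_ifs <;> omega

lemma stepDX (r o r' o' : Int) (hr : 1 ≤ r) (ho1 : 1 ≤ o) (hs : SuccRep r o r' o') :
    (if preLeft r o - 1 = 0 then -preDY r o else preDX r o) = preDX r' o' := by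
  unfold SuccRep at hs; unfold preLeft preDY preDX; split_ifs <;> omega

lemma stepDY (r o r' o' : Int) (hr : 1 ≤ r) (ho1 : 1 ≤ o) (hs : SuccRep r o r' o') :
    (if preLeft r o - 1 = 0 then preDX r o else preDY r o) = preDY r' o' := by
  unfold SuccRep at hs; unfold preLeft preDX preDY; split_ifs <;> omega

lemma stepRun (r o r' o' : Int) (hr : 1 ≤ r) (ho1 : 1 ≤ o) (hs : SuccRep r o r' o') :
    (if preLeft r o - 1 = 0 then (if preLegs r o - 1 = 0 then preRun r o + 1 else preRun r o)
      else preRun r o) = preRun r' o' := by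
  unfold SuccRep at hs; unfold preLeft preLegs preRun; split_ifs <;> omega

lemma stepLeft (r o r' o' : Int) (hr : 1 ≤ r) (ho1 : 1 ≤ o) (hs : SuccRep r o r' o') :
    (if preLeft r o - 1 = 0 then (if preLegs r o - 1 = 0 then preRun r o + 1 else preRun r o)
      else preLeft r o - 1) = preLeft r' o' := by
  unfold SuccRep at hs; unfold preLeft preLegs preRun; split_ifs <;> omega

lemma stepLegs (r o r' o' : Int) (hr : 1 ≤ r) (ho1 : 1 ≤ o) (hs : SuccRep r o r' o') :
    (if preLeft r o - 1 = 0 then (if preLegs r o - 1 = 0 then 2 else preLegs r o - 1)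
      else preLegs r o) = preLegs r' o' := by
  unfold SuccRep at hs; unfold preLeft preLegs; split_ifs <;> omega

def FreshC (cache : PySem.Dict (Int × Int) Int) (n : Int) : Prop :=
  ∀ r' o' : Int, 1 ≤ r' → 1 ≤ o' → o' ≤ 8 * r' → n ≤ (2 * r' - 1) ^ 2 + o' →
    cache.contains (posFor r' o') = false

-- the loops compute the same value from the same cache, in lock step
lemma main_loop (val : Int) : ∀ (fuel : Nat) (r o : Int) (cache : PySem.Dict (Int × Int) Int),
    1 ≤ r → 1 ≤ o → o ≤ 8 * r → FreshC cache ((2 * r - 1) ^ 2 + o) →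
    loopA val cache ((2 * r - 1) ^ 2 + o) fuel =
      loopB val cache (preX r o) (preY r o) (preDX r o) (preDY r o)
        (preRun r o) (preLeft r o) (preLegs r o) fuel := by
  intro fuel
  induction fuel with
  | zero => intro r o cache _ _ _ _; rfl
  | succ fuel ih =>
    intro r o cache hr ho1 ho2 hF
    have hcell : x_y ((2 * r - 1) ^ 2 + o) = posFor r o := x_y_rep r o hr ho1 ho2
    have hcont : cache.contains (posFor r o) = false := hF r o hr ho1 ho2 le_rfl
    have hsum := sums_eq cache (posForX r o) (posForY r o)
    simp only [loopA, loopB, calcValA, hcell, hcont, Bool.false_eq_true, if_false,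
      moveX r o hr ho1 ho2, moveY r o hr ho1 ho2]
    rw [PySem.Dict.getD_insert_self, ← hsum]
    set v := (neighborsA (posFor r o)).foldl (fun a nb => a + cache.getD nb 0) 0 with hv
    have hposfor : posFor r o = (posForX r o, posForY r o) := rfl
    rw [← hposfor]
    by_cases hgt : v > val
    · rw [if_pos hgt, if_pos hgt]
      rw [PySem.Dict.contains_insert_self]
      simp only [if_true]
      exact PySem.Dict.getD_insert_self _ _ _ _
    · rw [if_neg hgt, if_neg hgt]
      -- successor representation
      have hsucc : ∃ r' o', SuccRep r o r' o' ∧ 1 ≤ r' ∧ 1 ≤ o' ∧ o' ≤ 8 * r' ∧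
          (2 * r - 1) ^ 2 + o + 1 = (2 * r' - 1) ^ 2 + o' := by
        by_cases h8 : o = 8 * r
        · exact ⟨r + 1, 1, Or.inr ⟨h8, rfl, rfl⟩, by omega, by omega, by omega, by subst h8; ring⟩
        · exact ⟨r, o + 1, Or.inl ⟨by omega, rfl, rfl⟩, by omega, by omega, by omega, by ring⟩
      obtain ⟨r', o', hs, hr', ho1', ho2', hn⟩ := hsucc
      have hF' : FreshC (cache.insert (posFor r o) v) ((2 * r' - 1) ^ 2 + o') := by
        intro r2 o2 hr2 ho12 ho22 hge
        rw [PySem.Dict.contains_insert]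
        have hne : posFor r2 o2 ≠ posFor r o := by
          intro he
          obtain ⟨he1, he2⟩ := posFor_inj r2 o2 r o hr2 ho12 ho22 hr ho1 ho2 he
          subst he1; subst he2
          omega
        have h1 : (posFor r2 o2 == posFor r o) = false := beq_eq_false_iff_ne.mpr hne
        rw [h1, Bool.false_or]
        exact hF r2 o2 hr2 ho12 ho22 (by omega)
      have hih := ih r' o' (cache.insert (posFor r o) v) hr' ho1' ho2' hF'
      rw [← hn] at hih
      have hdx := stepDX r o r' o' hr ho1 hs
      have hdy := stepDY r o r' o' hr ho1 hs
      have hrun := stepRun r o r' o' hr ho1 hs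
      have hleft := stepLeft r o r' o' hr ho1 hs
      have hlegs := stepLegs r o r' o' hr ho1 hs
      rw [hih, nextX r o r' o' hr ho1 hs, nextY r o r' o' hr ho1 hs, ← hv]
      split_ifs with hL hG
      · rw [if_pos hL] at hdx hdy hrun hleft hlegs
        rw [if_pos hG] at hrun hleft hlegs
        rw [← hdx, ← hdy, ← hrun, ← hleft, ← hlegs]
      · rw [if_pos hL] at hdx hdy hrun hleft hlegs
        rw [if_neg hG] at hrun hleft hlegs
        rw [← hdx, ← hdy, ← hrun, ← hleft, ← hlegs]
      · rw [if_neg hL] at hdx hdy hrun hleft hlegs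
        rw [← hdx, ← hdy, ← hrun, ← hleft, ← hlegs]

lemma sqmono2 (a b : Int) (ha : 0 ≤ a) (hab : a ≤ b) : (2 * a + 1) ^ 2 ≤ (2 * b + 1) ^ 2 := by
  nlinarith

lemma bsearch_inv (v : Int) : ∀ (fuel : Nat) (lo hi : Int), 0 ≤ lo → lo ≤ hi →
    v ≤ (2 * hi + 1) ^ 2 → (∀ m : Int, 0 ≤ m → m < lo → ¬ v ≤ (2 * m + 1) ^ 2) →
    (hi - lo).toNat < fuel →
    lo ≤ bsearchB v lo hi fuel ∧ bsearchB v lo hi fuel ≤ hi ∧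
      v ≤ (2 * bsearchB v lo hi fuel + 1) ^ 2 ∧
      ∀ m : Int, 0 ≤ m → m < bsearchB v lo hi fuel → ¬ v ≤ (2 * m + 1) ^ 2 := by
  intro fuel
  induction fuel with
  | zero => intro lo hi h0 hlh hP hmin hf; omega
  | succ fuel ih =>
    intro lo hi h0 hlh hP hmin hf
    by_cases hlt : lo < hi
    · simp only [bsearchB, if_pos hlt]
      have hmb := PySem.Int.floordiv_two_mid_bounds hlh
      have hmu : PySem.Int.floordiv (lo + hi) 2 < hi := by
        rw [PySem.Int.floordiv_lt_iff_lt_mul (by omega)]; omega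
      set mid := PySem.Int.floordiv (lo + hi) 2 with hmid
      by_cases hpm : v ≤ (2 * mid + 1) ^ 2
      · rw [if_pos hpm]
        obtain ⟨a, b, c, d⟩ := ih lo mid h0 (by omega) hpm hmin (by omega)
        exact ⟨a, by omega, c, d⟩
      · rw [if_neg hpm]
        have hmin' : ∀ m : Int, 0 ≤ m → m < mid + 1 → ¬ v ≤ (2 * m + 1) ^ 2 := by
          intro m hm0 hmlt
          by_cases hmlo : m < lo
          · exact hmin m hm0 hmlo
          · intro hPm
            exact hpm (le_trans hPm (sqmono2 m mid hm0 (by omega)))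
        obtain ⟨a, b, c, d⟩ := ih (mid + 1) hi (by omega) (by omega) hP hmin' (by omega)
        exact ⟨by omega, b, c, d⟩
    · simp only [bsearchB, if_neg hlt]
      have heq : lo = hi := by omega
      subst heq
      exact ⟨le_rfl, le_rfl, hP, fun m hm0 hmlt => hmin m hm0 hmlt⟩

theorem run_day03_part1 (val : Int) : part1A val = part1B val := by
  by_cases hv : val ≤ 1
  · have hrad : ((radiusA val : Nat) : Int) = 0 := by
      rw [radiusA_eq val 0 (by simpa using hv) (by intro r' h; omega)]
      norm_num
    have hm : PySem.Int.mod (val - 0) 1 = 0 := by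
      rw [PySem.Int.mod_eq_emod_of_pos (by norm_num)]; omega
    have f4 : PySem.Int.floordiv 1 4 = 0 := by decide
    have f2 : PySem.Int.floordiv 1 2 = 0 := by decide
    have f34 : PySem.Int.floordiv (1 * 3) 4 = 0 := by decide
    unfold part1A part1B
    rw [if_pos hv]
    simp only [x_y, hrad]
    norm_num [hm, f4, f2, f34]
  · rw [not_le] at hv
    -- binary-search facts
    have hPv : val ≤ (2 * val + 1) ^ 2 := by nlinarith
    obtain ⟨h1, h2, h3, h4⟩ := bsearch_inv val (val.toNat + 1) 0 val (le_refl 0) (by omega) hPv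
      (by intro m hm0 hmlt; omega) (by omega)
    set r := bsearchB val 0 val (val.toNat + 1) with hrdef
    have hr1 : 1 ≤ r := by
      by_contra h
      have hr0 : r = 0 := by omega
      rw [hr0] at h3
      norm_num at h3
      omega
    have hlow : (2 * r - 1) ^ 2 < val := by
      have := h4 (r - 1) (by omega) (by omega)
      rw [not_le] at this
      calc (2 * r - 1) ^ 2 = (2 * (r - 1) + 1) ^ 2 := by ring
        _ < val := this
    set o := val - (2 * r - 1) ^ 2 with hodef
    have hsq : (2 * r + 1) ^ 2 = (2 * r - 1) ^ 2 + 8 * r := by ring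
    have ho1 : 1 ≤ o := by omega
    have ho2 : o ≤ 8 * r := by omega
    have hval : val = (2 * r - 1) ^ 2 + o := by omega
    have hxy : x_y val = posFor r o := by rw [hval]; exact x_y_rep r o hr1 ho1 ho2
    have harg : val - (2 * r - 1) ^ 2 - 1 = o - 1 := by omega
    have hmod : PySem.Int.mod (val - (2 * r - 1) ^ 2 - 1) (2 * r) =
        (if o ≤ 2 * r then o - 1 else if o ≤ 4 * r then o - 1 - 2 * r
         else if o ≤ 6 * r then o - 1 - 4 * r else o - 1 - 6 * r) := by
      rw [PySem.Int.mod_eq_emod_of_pos (by omega), harg]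
      split_ifs with a b c
      · exact Int.emod_eq_of_lt (by omega) (by omega)
      · rw [← Int.sub_emod_right]
        exact Int.emod_eq_of_lt (by omega) (by omega)
      · rw [← Int.sub_emod_right, ← Int.sub_emod_right]
        have he : o - 1 - 2 * r - 2 * r = o - 1 - 4 * r := by ring
        rw [he]
        exact Int.emod_eq_of_lt (by omega) (by omega)
      · rw [← Int.sub_emod_right, ← Int.sub_emod_right, ← Int.sub_emod_right]
        have he : o - 1 - 2 * r - 2 * r - 2 * r = o - 1 - 6 * r := by ring
        rw [he]
        exact Int.emod_eq_of_lt (by omega) (by omega)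
    unfold part1A part1B
    rw [if_neg (by omega)]
    simp only [hxy, posFor, ← hrdef, hmod]
    unfold posForX posForY
    split_ifs <;> omega

lemma loopA_succ (val : Int) (cache : PySem.Dict (Int × Int) Int) (idx : Int) (fuel : Nat) :
    loopA val cache idx (fuel + 1) =
      (if (calcValA cache (x_y idx)).2 > val then (calcValA (calcValA cache (x_y idx)).1 (x_y idx)).2
       else loopA val (calcValA cache (x_y idx)).1 (idx + 1) fuel) := rfl

theorem run_day03_part2 (val : Int) :
    loopA val (PySem.Dict.empty.insert (0, 0) 1) 1 (val.toNat + 9) = part2B val := by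
  have hfu : val.toNat + 9 = (val.toNat + 8) + 1 := rfl
  have hcont : (PySem.Dict.empty.insert ((0 : Int), (0 : Int)) (1 : Int)).contains (0, 0) = true :=
    PySem.Dict.contains_insert_self _ _ _
  have hgd : (PySem.Dict.empty.insert ((0 : Int), (0 : Int)) (1 : Int)).getD (0, 0) 0 = 1 :=
    PySem.Dict.getD_insert_self _ _ _ _
  have hcv : calcValA (PySem.Dict.empty.insert ((0 : Int), (0 : Int)) 1) (x_y 1) =
      (PySem.Dict.empty.insert ((0 : Int), (0 : Int)) 1, 1) := by decide
  rw [hfu, loopA_succ]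
  simp only [hcv]
  unfold part2B
  by_cases hv : 1 > val
  · rw [if_pos hv, if_pos hv]
  · rw [if_neg hv, if_neg hv]
    rw [show (1 : Int) + 1 = 2 from by norm_num]
    have hF : FreshC (PySem.Dict.empty.insert ((0 : Int), (0 : Int)) 1) ((2 * 1 - 1) ^ 2 + 1) := by
      intro r' o' hr' ho1' ho2' _
      rw [PySem.Dict.contains_insert, PySem.Dict.contains_empty,
        beq_eq_false_iff_ne.mpr (posFor_ne_origin r' o' hr' ho1' ho2'), Bool.false_or]
    have hmain := main_loop val (val.toNat + 8) 1 1
      (PySem.Dict.empty.insert ((0 : Int), (0 : Int)) 1) (by omega) (by omega) (by omega) hF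
    have h2 : ((2 * (1 : Int) - 1) ^ 2 + 1) = 2 := by norm_num
    rw [h2] at hmain
    have e1 : preX 1 1 = 0 := by decide
    have e2 : preY 1 1 = 0 := by decide
    have e3 : preDX 1 1 = 1 := by decide
    have e4 : preDY 1 1 = 0 := by decide
    have e5 : preRun 1 1 = 1 := by decide
    have e6 : preLeft 1 1 = 1 := by decide
    have e7 : preLegs 1 1 = 2 := by decide
    rw [e1, e2, e3, e4, e5, e6, e7] at hmain
    exact hmain

-- ===== VERDICT =====
theorem run_day03_spec : Claim_equal_run_day03 := by
  intro input _ hpre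
  obtain ⟨hne, hsome⟩ := hpre
  unfold Spec_run_day03 run_day03 run_day03_alt
  match input, hne with
  | s :: rest, _ =>
    have hget : PySem.List.pyGet? (s :: rest) 0 = some s := by
      simp [PySem.List.pyGet?, PySem.List.pyIdx?]
    rw [hget]
    simp only [List.headD] at hsome
    cases hv : PySem.Int.ofStr? s with
    | none => rw [hv] at hsome; simp at hsome
    | some val => simp only [run_day03_part1, run_day03_part2]
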